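-- pv_equiv track=rewrite | github.com/eldad1221/Open_u_python_course | exam_02.py | is_identity
-- ===== SOURCE A (Python) =====
-- def is_identity(mat: list[list], x: int, size: int) -> bool:
--     for i in range(size**2):
--         if i % (size + 1) == 0:
--             if mat[x + i % size][x + i // size] != 1:
--                 return False
--         else:
--             if mat[x + i % size][x + i // size] != 0:
--                 return False
--     return True
-- ===== SOURCE B (Python) =====
-- def is_identity(mat: list[list], x: int, size: int) -> bool:
--     # border peeling: check the L-shaped border of the n x n block (corner = 1,
--     # rest of last row/column = 0), then shrink to the (n-1) x (n-1) block
--     n = size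
--     while n > 0:
--         d = n - 1
--         if mat[x + d][x + d] != 1:
--             return False
--         for j in range(d):
--             if mat[x + d][x + j] != 0 or mat[x + j][x + d] != 0:
--                 return False
--         n = d
--     return True
-- ===== Notes on version B (the rewrite author's own statement) =====
-- stated objective: alternative
-- what changed: A's single flat scan over range(size**2) with i%size / i//size / i%(size+1) index arithmetic is replaced by iterative border peeling: repeatedly verify the L-shaped border of the current n x n block (corner 1, rest of its last row and column 0) and shrink to the (n-1) x (n-1) block.
-- outside the precondition, e.g. on is_identity([[1], [9]], 0, 2): A returns False, B raises IndexError; on is_identity([[0]], 0, 2): A returns False, B raises IndexError; on is_identity([[0]], 0, -2): A returns False, B returns True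
import Mathlib
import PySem

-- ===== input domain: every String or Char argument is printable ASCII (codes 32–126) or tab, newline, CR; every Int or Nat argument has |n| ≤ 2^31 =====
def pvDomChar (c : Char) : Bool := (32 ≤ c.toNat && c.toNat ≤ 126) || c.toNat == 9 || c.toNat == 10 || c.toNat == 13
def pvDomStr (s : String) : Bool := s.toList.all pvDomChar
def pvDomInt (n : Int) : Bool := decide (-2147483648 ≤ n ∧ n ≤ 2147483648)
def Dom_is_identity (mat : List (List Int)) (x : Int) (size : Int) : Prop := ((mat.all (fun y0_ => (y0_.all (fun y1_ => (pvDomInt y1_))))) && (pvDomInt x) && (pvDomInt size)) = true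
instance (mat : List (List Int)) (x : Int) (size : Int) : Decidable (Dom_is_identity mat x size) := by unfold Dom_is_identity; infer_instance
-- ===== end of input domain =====

-- B replaces A's flat scan over range(size**2) with i%size / i//size / i%(size+1) index
-- arithmetic by iterative border peeling: verify the L-shaped border of the current n×n block
-- (corner 1, rest of its last row and column 0), then shrink to the (n-1)×(n-1) block
-- (objective: alternative); equal to A wherever the whole size×size submatrix is addressable.

-- ===== PORT A =====
-- transliteration of A's flat `for i in range(size**2)` loop with early return, as a counting
-- loop (Python's range is lazy; fuel = number of remaining iterations, i = current index);
-- a none from pyGet? models IndexError (unclaimed: Pre_ excludes it)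
def pvALoop (mat : List (List Int)) (x : Int) (size : Int) : Nat → Int → Bool
  | 0, _ => true
  | fuel + 1, i =>
    if PySem.Int.mod i (size + 1) == 0 then
      match (PySem.List.pyGet? mat (x + PySem.Int.mod i size)).bind
          (fun row => PySem.List.pyGet? row (x + PySem.Int.floordiv i size)) with
      | none => false
      | some v => if v ≠ 1 then false else pvALoop mat x size fuel (i + 1)
    else
      match (PySem.List.pyGet? mat (x + PySem.Int.mod i size)).bind
          (fun row => PySem.List.pyGet? row (x + PySem.Int.floordiv i size)) with
      | none => false
      | some v => if v ≠ 0 then false else pvALoop mat x size fuel (i + 1)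

def is_identity (mat : List (List Int)) (x : Int) (size : Int) : Bool :=
  pvALoop mat x size (size ^ 2).toNat 0

-- ===== PORT B =====
-- the cell read mat[a][b] (a none models IndexError; unclaimed: Pre_ excludes it)
def pvCell (mat : List (List Int)) (a b : Int) : Option Int :=
  (PySem.List.pyGet? mat a).bind fun row => PySem.List.pyGet? row b

-- B's inner `for j in range(d)` border loop: off-diagonal entries of row d and column d are 0
def pvBorder (mat : List (List Int)) (x d : Int) : Nat → Int → Bool
  | 0, _ => true
  | fuel + 1, j =>
    match pvCell mat (x + d) (x + j) with
    | none => false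
    | some a =>
      if a ≠ 0 then false
      else
        match pvCell mat (x + j) (x + d) with
        | none => false
        | some b => if b ≠ 0 then false else pvBorder mat x d fuel (j + 1)

-- B's outer `while n > 0` peeling loop, on the fuel n
def pvPeel (mat : List (List Int)) (x : Int) : Nat → Bool
  | 0 => true
  | d + 1 =>
    match pvCell mat (x + (d : Int)) (x + (d : Int)) with
    | none => false
    | some v =>
      if v ≠ 1 then false
      else pvBorder mat x (d : Int) d 0 && pvPeel mat x d

def is_identity_alt (mat : List (List Int)) (x : Int) (size : Int) : Bool :=
  pvPeel mat x size.toNat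

-- ===== PRECONDITION & SPEC =====
-- Pre_ restricts to the natural domain: size ≥ 0 (at size = -1 A raises ZeroDivisionError, and
-- for other negative sizes A's behaviour is an artefact of Python's negative-divisor arithmetic)
-- and every entry of the size×size submatrix addressable (otherwise the value or the first
-- IndexError depends on each implementation's accidental traversal order); the size bound
-- conjunct is implied by addressability of column 0 and only lets the instance decide fast.
def Pre_is_identity (mat : List (List Int)) (x : Int) (size : Int) : Prop :=
  0 ≤ size ∧ size ≤ 2 * (mat.length : Int) ∧
    ∀ r ∈ PySem.List.pyRange 0 size 1, ∀ c ∈ PySem.List.pyRange 0 size 1,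
      (((PySem.List.pyGet? mat (x + r)).bind
          fun row => PySem.List.pyGet? row (x + c)).isSome) = true
instance (mat : List (List Int)) (x : Int) (size : Int) : Decidable (Pre_is_identity mat x size) := by
  unfold Pre_is_identity; infer_instance

def pvWitness_is_identity : List (List Int) × Int × Int := ([[1, 0], [0, 1]], 0, 2)

def Spec_is_identity (mat : List (List Int)) (x : Int) (size : Int) (out : Bool) : Prop := out = is_identity_alt mat x size
instance (mat : List (List Int)) (x : Int) (size : Int) (out : Bool) : Decidable (Spec_is_identity mat x size out) := by unfold Spec_is_identity; infer_instance

-- ===== CLAIM (what is proved, stated in full; the proofs are below) =====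
def Claim_equal_is_identity : Prop := ∀ (mat : List (List Int)) (x : Int) (size : Int), Dom_is_identity mat x size → Pre_is_identity mat x size → Spec_is_identity mat x size (is_identity mat x size)

-- ===== LEMMAS AND PROOFS =====

-- the common grid check: the (r, c) entry of the block equals 1 on the diagonal, 0 off it
def pvQ (mat : List (List Int)) (x r c : Int) : Bool :=
  pvCell mat (x + r) (x + c) == some (if r == c then 1 else 0)

-- A's per-index check, as a pure predicate
def pvCheckA (mat : List (List Int)) (x : Int) (size : Int) (i : Int) : Bool :=
  pvCell mat (x + PySem.Int.mod i size) (x + PySem.Int.floordiv i size)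
    == some (if PySem.Int.mod i (size + 1) == 0 then 1 else 0)

lemma pvALoop_eq_all (mat : List (List Int)) (x : Int) (size : Int) (n : Nat) (i : Int) :
    pvALoop mat x size n i
      = ((List.range n).map (fun k : Nat => i + (k : Int))).all (pvCheckA mat x size) := by
  induction n generalizing i with
  | zero => rfl
  | succ n ih =>
    have hfun : ((fun k : Nat => i + (k : Int)) ∘ Nat.succ) = fun k : Nat => (i + 1) + (k : Int) := by
      funext k
      simp only [Function.comp_apply]
      push_cast
      ring
    rw [List.range_succ_eq_map, List.map_cons, List.map_map, hfun, List.all_cons, ← ih]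
    have h0 : i + ((0 : Nat) : Int) = i := by simp
    rw [h0]
    simp only [pvALoop, pvCheckA, pvCell]
    split_ifs with h
    · rcases hcell : (PySem.List.pyGet? mat (x + PySem.Int.mod i size)).bind
          (fun row => PySem.List.pyGet? row (x + PySem.Int.floordiv i size)) with _ | v
      · simp
      · by_cases hv : v = 1 <;> simp [hv]
    · rcases hcell : (PySem.List.pyGet? mat (x + PySem.Int.mod i size)).bind
          (fun row => PySem.List.pyGet? row (x + PySem.Int.floordiv i size)) with _ | v
      · simp
      · by_cases hv : v = 0 <;> simp [hv]

lemma is_identity_eq_all (mat : List (List Int)) (x : Int) (size : Int) :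
    is_identity mat x size
      = (PySem.List.pyRange 0 (size ^ 2) 1).all (pvCheckA mat x size) := by
  rw [is_identity, pvALoop_eq_all, PySem.List.pyRange_one]
  simp [List.all_map, Function.comp_def]

-- i % (size+1) = 0 on the grid exactly on the diagonal
lemma pvDiag_iff (size r c : Int) (hr0 : 0 ≤ r) (hr : r < size) (hc0 : 0 ≤ c) (hc : c < size) :
    PySem.Int.mod (size * c + r) (size + 1) = 0 ↔ r = c := by
  rw [PySem.Int.mod_eq_zero_iff_dvd]
  constructor
  · intro hdvd
    have h2 : (size + 1) ∣ (r - c) := by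
      have heq : r - c = (size * c + r) - (size + 1) * c := by ring
      rw [heq]
      exact dvd_sub hdvd (Dvd.intro c rfl)
    have := Int.eq_zero_of_dvd_of_natAbs_lt_natAbs h2 (by omega)
    omega
  · rintro rfl
    exact ⟨r, by ring⟩

-- A's check at flat index size*c + r is the grid check at (r, c)
lemma pvCheckA_grid (mat : List (List Int)) (x : Int) (size r c : Int)
    (hr0 : 0 ≤ r) (hr : r < size) (hc0 : 0 ≤ c) (hc : c < size) :
    pvCheckA mat x size (size * c + r) = pvQ mat x r c := by
  have hpos : 0 < size := by omega
  have hmod : PySem.Int.mod (size * c + r) size = r := by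
    rw [PySem.Int.mod_eq_emod_of_pos hpos]
    have : size * c + r = r + size * c := by ring
    rw [this, Int.add_mul_emod_self_left, Int.emod_eq_of_lt hr0 hr]
  have hdiv : PySem.Int.floordiv (size * c + r) size = c := by
    rw [PySem.Int.floordiv_eq_ediv_of_pos hpos]
    have : size * c + r = r + size * c := by ring
    rw [this, Int.add_mul_ediv_left _ _ (by omega : size ≠ 0),
      Int.ediv_eq_zero_of_lt hr0 hr, zero_add]
  have hdiag : (PySem.Int.mod (size * c + r) (size + 1) == 0) = (r == c) := by
    have := pvDiag_iff size r c hr0 hr hc0 hc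
    by_cases h : r = c <;> simp_all
  simp only [pvCheckA, pvQ, hmod, hdiv, hdiag]

-- A = true iff the grid check holds everywhere on the block
lemma is_identity_iff_grid (mat : List (List Int)) (x : Int) (size : Int) (hsz : 0 ≤ size) :
    is_identity mat x size = true ↔
      ∀ r c : Int, 0 ≤ r → r < size → 0 ≤ c → c < size → pvQ mat x r c = true := by
  rw [is_identity_eq_all]
  simp only [List.all_eq_true, PySem.List.mem_pyRange_one]
  constructor
  · intro hA r c hr0 hr hc0 hc
    have hb : 0 ≤ size * c + r ∧ size * c + r < size ^ 2 := by
      constructor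
      · have := mul_nonneg (le_of_lt (by omega : (0:Int) < size)) hc0
        omega
      · have h1 : size * c + r ≤ size * (size - 1) + (size - 1) := by
          have := mul_le_mul_of_nonneg_left (by omega : c ≤ size - 1)
            (by omega : (0:Int) ≤ size)
          omega
        nlinarith
    have := hA (size * c + r) ⟨hb.1, hb.2⟩
    rwa [pvCheckA_grid mat x size r c hr0 hr hc0 hc] at this
  · intro hB i ⟨hi0, hi⟩
    have hpos : 0 < size := by
      by_contra h
      have : size = 0 := by omega
      subst this
      simp at hi
      omega
    have hr0 : 0 ≤ i % size := Int.emod_nonneg i (by omega)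
    have hr : i % size < size := Int.emod_lt_of_pos i hpos
    have hc0 : 0 ≤ i / size := Int.ediv_nonneg hi0 (by omega)
    have hc : i / size < size := by
      rw [Int.ediv_lt_iff_lt_mul hpos]
      nlinarith [sq_nonneg size]
    have hdecomp : size * (i / size) + i % size = i := Int.mul_ediv_add_emod i size
    have := hB (i % size) (i / size) hr0 hr hc0 hc
    have hgrid := pvCheckA_grid mat x size (i % size) (i / size) hr0 hr hc0 hc
    rw [hdecomp] at hgrid
    rw [hgrid]
    exact this

-- B's border loop checks exactly the off-diagonal entries of row d and column d
lemma pvBorder_iff (mat : List (List Int)) (x d : Int) :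
    ∀ (fuel : Nat) (j : Int), 0 ≤ j → j + fuel ≤ d →
      (pvBorder mat x d fuel j = true ↔
        ∀ c : Int, j ≤ c → c < j + fuel → pvQ mat x d c = true ∧ pvQ mat x c d = true) := by
  intro fuel
  induction fuel with
  | zero =>
    intro j _ _
    simp only [pvBorder, Nat.cast_zero, add_zero]
    constructor
    · intro _ c h1 h2; omega
    · intro _; trivial
  | succ n ih =>
    intro j hj0 hjn
    have hjd : j < d := by push_cast at hjn ⊢; omega
    have hne : (d == j) = false := by simp; omega
    have hne' : (j == d) = false := by simp; omega
    constructor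
    · intro h c hc1 hc2
      simp only [pvBorder] at h
      rcases h1 : pvCell mat (x + d) (x + j) with _ | a
      · rw [h1] at h; exact absurd h (by simp)
      · rw [h1] at h
        by_cases ha : a = 0
        · subst ha
          simp only [ne_eq, not_true_eq_false, if_false] at h
          rcases h2 : pvCell mat (x + j) (x + d) with _ | b
          · rw [h2] at h; exact absurd h (by simp)
          · rw [h2] at h
            by_cases hb : b = 0
            · subst hb
              simp only [ne_eq, not_true_eq_false, if_false] at h
              by_cases hcj : c = j
              · subst hcj
                refine ⟨?_, ?_⟩ <;> simp [pvQ, h1, h2, hne, hne']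
              · have := (ih (j + 1) (by omega) (by push_cast at hjn ⊢; omega)).mp h c
                  (by omega) (by push_cast at hc2 ⊢; omega)
                exact this
            · simp [hb] at h
        · simp [ha] at h
    · intro h
      have hQ := h j le_rfl (by push_cast; omega)
      have h1 : pvCell mat (x + d) (x + j) = some 0 := by
        have := hQ.1
        simp only [pvQ, hne, if_false] at this
        exact (beq_iff_eq).mp this
      have h2 : pvCell mat (x + j) (x + d) = some 0 := by
        have := hQ.2
        simp only [pvQ, hne', if_false] at this
        exact (beq_iff_eq).mp this
      simp only [pvBorder, h1, h2, ne_eq, not_true_eq_false, if_false]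
      exact (ih (j + 1) (by omega) (by push_cast at hjn ⊢; omega)).mpr
        (fun c hc1 hc2 => h c (by omega) (by push_cast at hc2 ⊢; omega))

-- B's peeling loop checks exactly the whole n×n grid
lemma pvPeel_iff (mat : List (List Int)) (x : Int) :
    ∀ n : Nat, (pvPeel mat x n = true ↔
      ∀ r c : Int, 0 ≤ r → r < (n : Int) → 0 ≤ c → c < (n : Int) → pvQ mat x r c = true) := by
  intro n
  induction n with
  | zero =>
    simp only [pvPeel, Nat.cast_zero]
    constructor
    · intro _ r c h1 h2; omega
    · intro _; trivial
  | succ d ih =>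
    have hcast : ((d + 1 : Nat) : Int) = (d : Int) + 1 := by push_cast; ring
    constructor
    · intro h r c hr0 hr hc0 hc
      simp only [pvPeel] at h
      rcases h1 : pvCell mat (x + (d : Int)) (x + (d : Int)) with _ | v
      · rw [h1] at h; exact absurd h (by simp)
      · rw [h1] at h
        by_cases hv : v = 1
        · subst hv
          simp only [ne_eq, not_true_eq_false, if_false, Bool.and_eq_true] at h
          obtain ⟨hbord, hpeel⟩ := h
          rw [hcast] at hr hc
          by_cases hrd : r = (d : Int)
          · by_cases hcd : c = (d : Int)
            · subst hrd; subst hcd; simp [pvQ, h1]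
            · subst hrd
              exact ((pvBorder_iff mat x (d : Int) d 0 le_rfl (by simp)).mp hbord c
                hc0 (by omega)).1
          · by_cases hcd : c = (d : Int)
            · subst hcd
              exact ((pvBorder_iff mat x (d : Int) d 0 le_rfl (by simp)).mp hbord r
                hr0 (by omega)).2
            · exact ih.mp hpeel r c hr0 (by omega) hc0 (by omega)
        · simp [hv] at h
    · intro h
      have h1 : pvCell mat (x + (d : Int)) (x + (d : Int)) = some 1 := by
        have := h (d : Int) (d : Int) (by positivity) (by omega) (by positivity) (by omega)
        simp only [pvQ, beq_self_eq_true, if_true] at this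
        exact (beq_iff_eq).mp this
      simp only [pvPeel, h1, ne_eq, not_true_eq_false, if_false, Bool.and_eq_true]
      refine ⟨?_, ih.mpr fun r c hr0 hr hc0 hc =>
        h r c hr0 (by omega) hc0 (by omega)⟩
      exact (pvBorder_iff mat x (d : Int) d 0 le_rfl (by simp)).mpr
        (fun c hc1 hc2 =>
          ⟨h (d : Int) c (by positivity) (by omega) hc1 (by push_cast at hc2 ⊢; omega),
           h c (d : Int) hc1 (by push_cast at hc2 ⊢; omega) (by positivity) (by omega)⟩)

-- ===== VERDICT =====
theorem is_identity_spec : Claim_equal_is_identity := by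
  intro mat x size _hdom hpre
  obtain ⟨hsz, _hlen, _hcells⟩ := hpre
  unfold Spec_is_identity is_identity_alt
  rw [Bool.eq_iff_iff, is_identity_iff_grid mat x size hsz, pvPeel_iff]
  rw [Int.toNat_of_nonneg hsz]
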